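-- pv_equiv track=rewrite | github.com/prakashgbid/caia | knowledge-system/agents/specialized/research_agent.py | _extract_preferred_sources
-- ===== SOURCE A (Python) =====
-- from typing import Dict, Any, List, Optional, Union
--
-- def _extract_preferred_sources(task: str) -> Optional[List[str]]:
--     """Extract preferred sources from task"""
--     sources = []
--     task_lower = task.lower()
--
--     source_mapping = {
--         'google': 'web',
--         'web': 'web',
--         'documentation': 'documentation',
--         'docs': 'documentation',
--         'github': 'github',
--         'academic': 'academic',
--         'papers': 'academic',
--         'stackoverflow': 'stackoverflow',
--         'stack overflow': 'stackoverflow',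
--         'reddit': 'reddit',
--         'forum': 'forum'
--     }
--
--     for keyword, source in source_mapping.items():
--         if keyword in task_lower and source not in sources:
--             sources.append(source)
--
--     return sources if sources else None
-- ===== SOURCE B (Python) =====
-- def _extract_preferred_sources(task):
--     """Extract preferred sources from task"""
--     t = task.lower()
--     source_aliases = {
--         'web': ['google', 'web'],
--         'documentation': ['documentation', 'docs'],
--         'github': ['github'],
--         'academic': ['academic', 'papers'],
--         'stackoverflow': ['stackoverflow', 'stack overflow'],
--         'reddit': ['reddit'],
--         'forum': ['forum'],
--     }
--     sources = [src for src, aliases in source_aliases.items()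
--                if any(a in t for a in aliases)]
--     return sources or None
-- ===== Notes on version B (the rewrite author's own statement) =====
-- stated objective: idiomatic
-- what changed: B groups the alias keywords by canonical source once and builds the result with a single comprehension using any(), eliminating A's per-keyword loop with its membership dedup test on the accumulator.
import Mathlib
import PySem

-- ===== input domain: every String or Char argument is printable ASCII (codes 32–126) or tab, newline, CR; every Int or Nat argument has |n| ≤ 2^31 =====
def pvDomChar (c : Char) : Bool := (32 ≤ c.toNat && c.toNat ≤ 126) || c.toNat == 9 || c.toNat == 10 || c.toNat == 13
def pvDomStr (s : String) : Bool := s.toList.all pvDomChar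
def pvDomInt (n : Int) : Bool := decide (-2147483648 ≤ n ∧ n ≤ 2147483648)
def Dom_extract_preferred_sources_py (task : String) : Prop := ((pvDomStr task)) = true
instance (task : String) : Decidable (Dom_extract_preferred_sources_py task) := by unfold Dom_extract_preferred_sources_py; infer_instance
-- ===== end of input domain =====

-- B groups the alias keywords by canonical source and builds the result in one
-- pass with any(), removing A's per-keyword membership dedup check (objective: idiomatic).


-- ===== PORT A =====
-- the dict literal source_mapping, in insertion order
def pvSourceMapping : List (String × String) :=
  [("google", "web"), ("web", "web"),
   ("documentation", "documentation"), ("docs", "documentation"),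
   ("github", "github"),
   ("academic", "academic"), ("papers", "academic"),
   ("stackoverflow", "stackoverflow"), ("stack overflow", "stackoverflow"),
   ("reddit", "reddit"), ("forum", "forum")]

-- the body of A's loop: 'if keyword in task_lower and source not in sources: sources.append(source)'
def pvStepA (task_lower : String) (sources : List String) (kv : String × String) : List String :=
  if PySem.Str.isIn kv.1 task_lower && !(sources.contains kv.2) then sources ++ [kv.2] else sources

def extract_preferred_sources_py (task : String) : Option (List String) :=
  let task_lower := PySem.Str.lower task
  let sources : List String := pvSourceMapping.foldl (pvStepA task_lower) []
  if sources = [] then none else some sources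

-- ===== PORT B =====
-- the dict literal source_aliases, in insertion order
def pvSourceAliases : List (String × List String) :=
  [("web", ["google", "web"]),
   ("documentation", ["documentation", "docs"]),
   ("github", ["github"]),
   ("academic", ["academic", "papers"]),
   ("stackoverflow", ["stackoverflow", "stack overflow"]),
   ("reddit", ["reddit"]),
   ("forum", ["forum"])]

def extract_preferred_sources_py_alt (task : String) : Option (List String) :=
  let t := PySem.Str.lower task
  let sources : List String :=
    (pvSourceAliases.filter (fun g => g.2.any (fun a => PySem.Str.isIn a t))).map Prod.fst
  if sources = [] then none else some sources

-- ===== PRECONDITION & SPEC =====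
def Spec_extract_preferred_sources_py (task : String) (out : Option (List String)) : Prop := out = extract_preferred_sources_py_alt task
instance (task : String) (out : Option (List String)) : Decidable (Spec_extract_preferred_sources_py task out) := by unfold Spec_extract_preferred_sources_py; infer_instance

-- ===== CLAIM (what is proved, stated in full; the proofs are below) =====
def Claim_equal_extract_preferred_sources_py : Prop := ∀ (task : String), Dom_extract_preferred_sources_py task → Spec_extract_preferred_sources_py task (extract_preferred_sources_py task)

-- ===== LEMMAS AND PROOFS =====

-- A's flat keyword→source pairs are B's groups, flattened
def pvPairsOf (gs : List (String × List String)) : List (String × String) :=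
  gs.flatMap (fun g => g.2.map (fun k => (k, g.1)))

-- once a group's source is in the accumulator, further aliases of it change nothing
theorem pvStepA_noop (t src : String) (aliases : List String) (acc : List String)
    (h : src ∈ acc) :
    (aliases.map (fun k => (k, src))).foldl (pvStepA t) acc = acc := by
  induction aliases with
  | nil => rfl
  | cons k ks ih =>
    simp only [List.map_cons, List.foldl_cons]
    rw [show pvStepA t acc (k, src) = acc by simp [pvStepA, h]]
    exact ih

-- one group's run of A's loop adds the source iff some alias matches
theorem pvStepA_group (t src : String) (aliases : List String) (acc : List String)
    (h : src ∉ acc) :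
    (aliases.map (fun k => (k, src))).foldl (pvStepA t) acc
      = if aliases.any (fun a => PySem.Chars.isIn a.toList t.toList) then acc ++ [src] else acc := by
  induction aliases with
  | nil => simp
  | cons k ks ih =>
    simp only [List.map_cons, List.foldl_cons, List.any_cons]
    by_cases hk : PySem.Chars.isIn k.toList t.toList = true
    · rw [show pvStepA t acc (k, src) = acc ++ [src] by simp [pvStepA, h, hk]]
      rw [pvStepA_noop t src ks _ (by simp)]
      simp [hk]
    · rw [show pvStepA t acc (k, src) = acc by simp [pvStepA, hk]]
      rw [ih]
      simp [Bool.eq_false_iff.mpr hk]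

-- A's whole loop over the flattened groups is B's filter, appended to the accumulator
theorem pvStepA_groups (t : String) (gs : List (String × List String)) (acc : List String)
    (hdisj : ∀ s ∈ gs.map Prod.fst, s ∉ acc) (hnodup : (gs.map Prod.fst).Nodup) :
    (pvPairsOf gs).foldl (pvStepA t) acc
      = acc ++ (gs.filter (fun g => g.2.any (fun a => PySem.Chars.isIn a.toList t.toList))).map Prod.fst := by
  induction gs generalizing acc with
  | nil => simp [pvPairsOf]
  | cons g gs ih =>
    simp only [List.map_cons, List.nodup_cons] at hnodup
    rw [show pvPairsOf (g :: gs) = (g.2.map fun k => (k, g.1)) ++ pvPairsOf gs from by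
      simp [pvPairsOf]]
    rw [List.foldl_append]
    rw [show (g.2.map fun k => (k, g.1)).foldl (pvStepA t) acc
          = if g.2.any (fun a => PySem.Chars.isIn a.toList t.toList) then acc ++ [g.1] else acc from
        pvStepA_group t g.1 g.2 acc (hdisj g.1 (by simp))]
    by_cases hg : g.2.any (fun a => PySem.Chars.isIn a.toList t.toList) = true
    · rw [if_pos hg]
      rw [ih (acc ++ [g.1])
        (by
          intro s hs
          simp only [List.mem_append, List.mem_singleton]
          rintro (h | rfl)
          · exact hdisj s (by simp [hs]) h
          · exact hnodup.1 hs) hnodup.2]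
      simp [hg]
    · rw [if_neg hg]
      rw [ih acc (fun s hs => hdisj s (by simp [hs])) hnodup.2]
      simp [Bool.eq_false_iff.mpr hg]

-- ===== VERDICT (by name: the statement is the Claim_ definition above) =====
theorem extract_preferred_sources_py_spec : Claim_equal_extract_preferred_sources_py := by
  intro task _
  unfold Spec_extract_preferred_sources_py extract_preferred_sources_py
    extract_preferred_sources_py_alt
  have hpairs : pvSourceMapping = pvPairsOf pvSourceAliases := by decide
  have key := pvStepA_groups (PySem.Str.lower task) pvSourceAliases []
    (by intro s _ h; exact absurd h (List.not_mem_nil)) (by decide)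
  simp only [hpairs, key, PySem.Str.isIn_eq, List.nil_append]
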